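-- pv_equiv track=rewrite | github.com/AshenSilverwolf/AdventOfCode_2022_Python | completed/day_3/day_3_2.py | check_for_badge
-- ===== SOURCE A (Python) =====
-- priorities = {
--     'a': 1,
--     'b': 2,
--     'c': 3,
--     'd': 4,
--     'e': 5,
--     'f': 6,
--     'g': 7,
--     'h': 8,
--     'i': 9,
--     'j': 10,
--     'k': 11,
--     'l': 12,
--     'm': 13,
--     'n': 14,
--     'o': 15,
--     'p': 16,
--     'q': 17,
--     'r': 18,
--     's': 19,
--     't': 20,
--     'u': 21,
--     'v': 22,
--     'w': 23,
--     'x': 24,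
--     'y': 25,
--     'z': 26,
--     'A': 27,
--     'B': 28,
--     'C': 29,
--     'D': 30,
--     'E': 31,
--     'F': 32,
--     'G': 33,
--     'H': 34,
--     'I': 35,
--     'J': 36,
--     'K': 37,
--     'L': 38,
--     'M': 39,
--     'N': 40,
--     'O': 41,
--     'P': 42,
--     'Q': 43,
--     'R': 44,
--     'S': 45,
--     'T': 46,
--     'U': 47,
--     'V': 48,
--     'W': 49,
--     'X': 50,
--     'Y': 51,
--     'Z': 52
-- }
--
-- def tally_items_in_compartment(compartment):
--
--     items = [0 for i in range(52)]
--
--     for item in compartment: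
--         items[priorities[item] - 1] += 1
--
--     return items
--
-- def check_for_badge(set):
--
--     set_contents = []
--
--     for sack in set:
--         set_contents.append(tally_items_in_compartment(sack))
--
--     priority = -1
--
--     for i in range(len(set_contents[0])):
--         if set_contents[0][i] > 0 and set_contents[1][i] > 0 and set_contents[2][i] > 0:
--             priority = i + 1
--
--     return priority
-- ===== SOURCE B (Python) =====
-- priorities = {c: i + 1 for i, c in enumerate('abcdefghijklmnopqrstuvwxyzABCDEFGHIJKLMNOPQRSTUVWXYZ')}
--
-- def check_for_badge(set):
--     common = {priorities[c] for c in set[0]}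
--     common &= {priorities[c] for c in set[1]}
--     common &= {priorities[c] for c in set[2]}
--     return max(common, default=-1)
-- ===== Notes on version B (the rewrite author's own statement) =====
-- stated objective: simpler
-- what changed: B replaces A's per-sack 52-bin tally arrays and last-hit index scan over all 52 priorities by building a priority set for each of the first three sacks, intersecting them, and returning max(common, default=-1); it reads only the first three sacks where A tallies every sack.
-- outside the precondition, e.g. on check_for_badge(['']): A returns -1, B raises IndexError; on check_for_badge(['', 'a']): A returns -1, B raises IndexError; on check_for_badge(['ab', 'b!', 'b']): A raises KeyError, B raises KeyError
import Mathlib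
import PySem

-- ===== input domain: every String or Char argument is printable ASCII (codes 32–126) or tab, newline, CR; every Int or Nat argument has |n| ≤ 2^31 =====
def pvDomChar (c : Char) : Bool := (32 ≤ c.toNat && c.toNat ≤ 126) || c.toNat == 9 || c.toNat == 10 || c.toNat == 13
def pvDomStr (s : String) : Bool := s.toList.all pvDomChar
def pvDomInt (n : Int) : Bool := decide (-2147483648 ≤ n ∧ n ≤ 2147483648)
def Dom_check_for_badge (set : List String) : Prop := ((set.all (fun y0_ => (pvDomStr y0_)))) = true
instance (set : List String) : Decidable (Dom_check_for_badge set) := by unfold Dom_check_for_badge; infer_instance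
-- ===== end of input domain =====

-- B replaces A's per-sack 52-bin tally arrays and index scan by priority sets of the
-- first three sacks, intersected, returning max(common, default=-1) (objective: simpler).


-- ===== PORT A =====
-- module-level dict 'priorities' (shared context of A and B)
def priorities : PySem.Dict Char Int := PySem.Dict.mk [('a', 1), ('b', 2), ('c', 3), ('d', 4), ('e', 5), ('f', 6), ('g', 7), ('h', 8), ('i', 9), ('j', 10), ('k', 11), ('l', 12), ('m', 13), ('n', 14), ('o', 15), ('p', 16), ('q', 17), ('r', 18), ('s', 19), ('t', 20), ('u', 21), ('v', 22), ('w', 23), ('x', 24), ('y', 25), ('z', 26), ('A', 27), ('B', 28), ('C', 29), ('D', 30), ('E', 31), ('F', 32), ('G', 33), ('H', 34), ('I', 35), ('J', 36), ('K', 37), ('L', 38), ('M', 39), ('N', 40), ('O', 41), ('P', 42), ('Q', 43), ('R', 44), ('S', 45), ('T', 46), ('U', 47), ('V', 48), ('W', 49), ('X', 50), ('Y', 51), ('Z', 52)]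

def tally_items_in_compartment (compartment : String) : List Int :=
  compartment.toList.foldl
    (fun items item =>
      PySem.List.pySetD items (PySem.Dict.getD priorities item 0 - 1)
        (PySem.List.pyGetD items (PySem.Dict.getD priorities item 0 - 1) 0 + 1))
    (List.replicate 52 (0 : Int))

def check_for_badge (set : List String) : Int :=
  let set_contents : List (List Int) :=
    set.foldl (fun acc sack => acc ++ [tally_items_in_compartment sack]) []
  (PySem.List.pyRange 0 ((PySem.List.pyGetD set_contents 0 []).length : Int) 1).foldl
    (fun priority i =>
      if 0 < PySem.List.pyGetD (PySem.List.pyGetD set_contents 0 []) i 0 ∧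
         0 < PySem.List.pyGetD (PySem.List.pyGetD set_contents 1 []) i 0 ∧
         0 < PySem.List.pyGetD (PySem.List.pyGetD set_contents 2 []) i 0
      then i + 1 else priority)
    (-1)

-- ===== PORT B =====
-- Source B builds 'priorities' by an enumerate-comprehension; this fold is its transliteration
def prioritiesB : PySem.Dict Char Int :=
  (PySem.List.enumerate "abcdefghijklmnopqrstuvwxyzABCDEFGHIJKLMNOPQRSTUVWXYZ".toList).foldl
    (fun d p => PySem.Dict.insert d p.2 (p.1 + 1)) PySem.Dict.empty

-- {priorities[c] for c in sack}
def sackPrioSet (sack : String) : PySem.Set Int :=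
  PySem.Set.ofList (sack.toList.map (fun c => PySem.Dict.getD prioritiesB c 0))

def check_for_badge_alt (set : List String) : Int :=
  let common0 := sackPrioSet (PySem.List.pyGetD set 0 "")
  let common1 := PySem.Set.inter common0 (sackPrioSet (PySem.List.pyGetD set 1 ""))
  let common2 := PySem.Set.inter common1 (sackPrioSet (PySem.List.pyGetD set 2 ""))
  PySem.List.maxD common2 (fun x => x) (-1)

-- ===== PRECONDITION & SPEC =====
-- Pre_ excludes inputs with a non-ASCII-letter character in any sack (A raises KeyError
-- in 'priorities') and inputs with fewer than three sacks, on which A raises IndexError —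
-- or, when the first sack shares no priority with those present, short-circuits to -1
-- while B's natural set indexing raises IndexError there.
def Pre_check_for_badge (set : List String) : Prop :=
  3 ≤ set.length ∧ (set.all (fun s => s.toList.all (fun c => priorities.contains c))) = true
instance (set : List String) : Decidable (Pre_check_for_badge set) := by
  unfold Pre_check_for_badge; infer_instance

def pvWitness_check_for_badge : List String := (["ab", "bc", "ab"])

def Spec_check_for_badge (set : List String) (out : Int) : Prop := out = check_for_badge_alt set
instance (set : List String) (out : Int) : Decidable (Spec_check_for_badge set out) := by
  unfold Spec_check_for_badge; infer_instance

-- ===== CLAIM (what is proved, stated in full; the proofs are below) =====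
def Claim_equal_check_for_badge : Prop := ∀ (set : List String), Dom_check_for_badge set → Pre_check_for_badge set → Spec_check_for_badge set (check_for_badge set)

-- ===== LEMMAS AND PROOFS =====

set_option maxRecDepth 8192 in
theorem prioritiesB_eq : prioritiesB = priorities := by decide

theorem prio_bounds (c : Char) (h : priorities.contains c = true) :
    1 ≤ PySem.Dict.getD priorities c 0 ∧ PySem.Dict.getD priorities c 0 ≤ 52 := by
  simp only [priorities, PySem.Dict.getD, PySem.Dict.get?, PySem.Dict.contains, List.find?] at *
  repeat' split
  all_goals simp_all

theorem foldl_last (l : List Int) (init : Int) :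
    l.foldl (fun _ i => i + 1) init = ((l.getLast?).map (· + 1)).getD init := by
  induction l generalizing init with
  | nil => rfl
  | cons x t ih =>
    cases t with
    | nil => simp [List.foldl]
    | cons y t' =>
      rw [List.foldl_cons, ih]
      obtain ⟨j, hj⟩ := Option.isSome_iff_exists.mp (by simp : (y :: t').getLast?.isSome)
      rw [List.getLast?_cons_cons, hj]
      rfl

theorem pairwise_le_getLast {l : List Int} (hp : l.Pairwise (· < ·)) {x j : Int}
    (hx : x ∈ l) (hj : l.getLast? = some j) : x ≤ j := by
  induction l with
  | nil => simp at hx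
  | cons y t ih =>
    cases t with
    | nil =>
      simp at hj hx; omega
    | cons z t' =>
      rw [List.getLast?_cons_cons] at hj
      rcases List.mem_cons.1 hx with rfl | hxt
      · have hjm : j ∈ z :: t' := List.mem_of_getLast? hj
        have := (List.pairwise_cons.1 hp).1 j hjm
        omega
      · exact ih (List.pairwise_cons.1 hp).2 hxt hj

theorem tally_step (items : List Int) (c : Char)
    (hb : 1 ≤ PySem.Dict.getD priorities c 0 ∧ PySem.Dict.getD priorities c 0 ≤ 52)
    (hlen : items.length = 52) (i : Nat) (hi : i < 52) :
    PySem.List.pyGetD (PySem.List.pySetD items (PySem.Dict.getD priorities c 0 - 1)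
        (PySem.List.pyGetD items (PySem.Dict.getD priorities c 0 - 1) 0 + 1)) (i : Int) 0
      = PySem.List.pyGetD items (i : Int) 0
        + (if PySem.Dict.getD priorities c 0 = (i : Int) + 1 then 1 else 0) := by
  set p := PySem.Dict.getD priorities c 0 with hp
  have h1 : p - 1 = ((p - 1).toNat : Int) := by omega
  have h2 : (p - 1).toNat < items.length := by omega
  rw [h1, PySem.List.pyGetD_pySetD_natCast _ _ _ _ _ h2]
  split_ifs with hcond hcond2 hcond2
  · rw [← h1, hcond, ← h1]
  · omega
  · omega
  · simp

theorem tally_loop (chars : List Char) (items : List Int)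
    (hlen : items.length = 52)
    (h : ∀ c ∈ chars, 1 ≤ PySem.Dict.getD priorities c 0 ∧ PySem.Dict.getD priorities c 0 ≤ 52)
    (i : Nat) (hi : i < 52) :
    PySem.List.pyGetD (chars.foldl
      (fun items item =>
        PySem.List.pySetD items (PySem.Dict.getD priorities item 0 - 1)
          (PySem.List.pyGetD items (PySem.Dict.getD priorities item 0 - 1) 0 + 1)) items) (i : Int) 0
    = PySem.List.pyGetD items (i : Int) 0
      + (chars.countP (fun c => PySem.Dict.getD priorities c 0 == (i : Int) + 1) : Int) := by
  induction chars generalizing items with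
  | nil => simp
  | cons c t ih =>
    have hb := h c (List.mem_cons_self ..)
    have hlen' : (PySem.List.pySetD items (PySem.Dict.getD priorities c 0 - 1)
        (PySem.List.pyGetD items (PySem.Dict.getD priorities c 0 - 1) 0 + 1)).length = 52 := by
      rw [PySem.List.length_pySetD]; exact hlen
    rw [List.foldl_cons, ih _ hlen' (fun c hc => h c (List.mem_cons_of_mem _ hc)),
        tally_step items c hb hlen i hi, List.countP_cons]
    simp only [beq_iff_eq]
    split_ifs <;> push_cast <;> ring

theorem tally_get (s : String)
    (h : ∀ c ∈ s.toList, 1 ≤ PySem.Dict.getD priorities c 0 ∧ PySem.Dict.getD priorities c 0 ≤ 52)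
    (i : Nat) (hi : i < 52) :
    (0 < PySem.List.pyGetD (tally_items_in_compartment s) (i : Int) 0 ↔
      ((i : Int) + 1) ∈ s.toList.map (fun c => PySem.Dict.getD priorities c 0)) := by
  rw [tally_items_in_compartment, tally_loop s.toList _ (by simp) h i hi]
  rw [PySem.List.pyGetD_natCast]
  have hz : (List.replicate 52 (0:Int)).getD i 0 = 0 := by
    rw [List.getD_eq_getElem?_getD, List.getElem?_replicate]; simp [hi]
  rw [hz]
  constructor
  · intro hpos
    have : 0 < s.toList.countP (fun c => PySem.Dict.getD priorities c 0 == (i : Int) + 1) := by omega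
    obtain ⟨c, hc, hcq⟩ := List.countP_pos_iff.mp this  -- direction
    exact List.mem_map.mpr ⟨c, hc, (beq_iff_eq.mp hcq).symm ▸ rfl⟩
  · intro hmem
    obtain ⟨c, hc, hcq⟩ := List.mem_map.mp hmem
    have : 0 < s.toList.countP (fun c => PySem.Dict.getD priorities c 0 == (i : Int) + 1) :=
      List.countP_pos_iff.mpr ⟨c, hc, beq_iff_eq.mpr hcq⟩
    omega

theorem length_tally_fold (chars : List Char) (items : List Int) :
    (chars.foldl
      (fun items item =>
        PySem.List.pySetD items (PySem.Dict.getD priorities item 0 - 1)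
          (PySem.List.pyGetD items (PySem.Dict.getD priorities item 0 - 1) 0 + 1)) items).length
    = items.length := by
  induction chars generalizing items with
  | nil => rfl
  | cons c t ih => rw [List.foldl_cons, ih, PySem.List.length_pySetD]

theorem length_tally (s : String) : (tally_items_in_compartment s).length = 52 := by
  rw [tally_items_in_compartment, length_tally_fold]; rfl

theorem check_for_badge_main (set : List String)
    (hpre : 3 ≤ set.length ∧ ∀ s ∈ set, ∀ c ∈ s.toList, priorities.contains c = true) :
    check_for_badge set = check_for_badge_alt set := by
  obtain ⟨hlen, hlet⟩ := hpre
  match set with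
  | [] => simp at hlen
  | [_] => simp at hlen
  | [_, _] => simp at hlen
  | s0 :: s1 :: s2 :: rest =>
  have hl0 := hlet s0 (by simp)
  have hl1 := hlet s1 (by simp)
  have hl2 := hlet s2 (by simp)
  have hb0 : ∀ c ∈ s0.toList, 1 ≤ PySem.Dict.getD priorities c 0 ∧ PySem.Dict.getD priorities c 0 ≤ 52 :=
    fun c hc => prio_bounds c (hl0 c hc)
  have hb1 : ∀ c ∈ s1.toList, _ := fun c hc => prio_bounds c (hl1 c hc)
  have hb2 : ∀ c ∈ s2.toList, _ := fun c hc => prio_bounds c (hl2 c hc)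
  -- abbreviations
  set t0 := tally_items_in_compartment s0 with ht0
  set t1 := tally_items_in_compartment s1 with ht1
  set t2 := tally_items_in_compartment s2 with ht2
  set m0 := s0.toList.map (fun c => PySem.Dict.getD priorities c 0) with hm0
  set m1 := s1.toList.map (fun c => PySem.Dict.getD priorities c 0) with hm1
  set m2 := s2.toList.map (fun c => PySem.Dict.getD priorities c 0) with hm2
  -- A side normalisation
  have hsc : (s0 :: s1 :: s2 :: rest).foldl (fun acc sack => acc ++ [tally_items_in_compartment sack]) []
      = t0 :: t1 :: t2 :: rest.map tally_items_in_compartment := by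
    rw [PySem.List.foldl_append_singleton_eq_map, List.nil_append, List.map_cons,
        List.map_cons, List.map_cons, ← ht0, ← ht1, ← ht2]
  have g0 : PySem.List.pyGetD (t0 :: t1 :: t2 :: rest.map tally_items_in_compartment) 0 [] = t0 := by
    rw [PySem.List.pyGetD_ofNat']; rfl
  have g1 : PySem.List.pyGetD (t0 :: t1 :: t2 :: rest.map tally_items_in_compartment) 1 [] = t1 := by
    rw [PySem.List.pyGetD_ofNat']; rfl
  have g2 : PySem.List.pyGetD (t0 :: t1 :: t2 :: rest.map tally_items_in_compartment) 2 [] = t2 := by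
    rw [PySem.List.pyGetD_ofNat']; rfl
  have hlt0 : t0.length = 52 := ht0 ▸ length_tally s0
  have hA : check_for_badge (s0 :: s1 :: s2 :: rest)
      = (((PySem.List.pyRange 0 52 1).filter
            (fun i => decide (0 < PySem.List.pyGetD t0 i 0 ∧ 0 < PySem.List.pyGetD t1 i 0 ∧
                             0 < PySem.List.pyGetD t2 i 0))).getLast?.map (· + 1)).getD (-1) := by
    simp only [check_for_badge, hsc, g0, g1, g2, hlt0]
    rw [PySem.List.foldl_ite_eq_foldl_filter, foldl_last]
    norm_num
  -- B side normalisation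
  have hB : check_for_badge_alt (s0 :: s1 :: s2 :: rest)
      = (PySem.List.max? (PySem.Set.inter (PySem.Set.inter (PySem.Set.ofList m0) (PySem.Set.ofList m1))
            (PySem.Set.ofList m2)) (fun x => x)).getD (-1) := by
    simp only [check_for_badge_alt, sackPrioSet, prioritiesB_eq, PySem.List.pyGetD_ofNat', PySem.List.maxD]
    rfl
  set l := PySem.Set.inter (PySem.Set.inter (PySem.Set.ofList m0) (PySem.Set.ofList m1))
      (PySem.Set.ofList m2) with hldef
  have hmeml : ∀ p : Int, p ∈ l ↔ p ∈ m0 ∧ p ∈ m1 ∧ p ∈ m2 := by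
    intro p
    rw [hldef, PySem.Set.mem_inter, PySem.Set.mem_inter, PySem.Set.mem_ofList,
        PySem.Set.mem_ofList, PySem.Set.mem_ofList]
    tauto
  have hQ : ∀ i : Nat, i < 52 →
      ((0 < PySem.List.pyGetD t0 (i : Int) 0 ∧ 0 < PySem.List.pyGetD t1 (i : Int) 0 ∧
        0 < PySem.List.pyGetD t2 (i : Int) 0) ↔ ((i : Int) + 1) ∈ l) := by
    intro i hi
    rw [hmeml, ht0, ht1, ht2, hm0, hm1, hm2,
        tally_get s0 hb0 i hi, tally_get s1 hb1 i hi, tally_get s2 hb2 i hi]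
  have hpair : ((PySem.List.pyRange 0 52 1).filter
      (fun i => decide (0 < PySem.List.pyGetD t0 i 0 ∧ 0 < PySem.List.pyGetD t1 i 0 ∧
                        0 < PySem.List.pyGetD t2 i 0))).Pairwise (· < ·) := by
    apply List.Pairwise.filter
    have hR : PySem.List.pyRange 0 52 1 = List.map (fun k : Nat => (k : Int)) (List.range 52) := by decide
    rw [hR]
    refine List.Pairwise.map _ ?_ List.pairwise_lt_range
    intro a b h; exact_mod_cast h
  rw [hA, hB]
  cases hmx : PySem.List.max? l (fun x : Int => x) with
  | none =>
    have hlnil : l = [] := (PySem.List.max?_eq_none_iff _ _).mp hmx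
    have hfil : ((PySem.List.pyRange 0 52 1).filter
        (fun i => decide (0 < PySem.List.pyGetD t0 i 0 ∧ 0 < PySem.List.pyGetD t1 i 0 ∧
                          0 < PySem.List.pyGetD t2 i 0))) = [] := by
      rw [List.filter_eq_nil_iff]
      intro i hiR
      have hrange := PySem.List.mem_pyRange_one.mp hiR
      have hi : i = ((i.toNat : Nat) : Int) := by omega
      have hlt : i.toNat < 52 := by omega
      simp only [decide_eq_true_eq]
      intro hcon
      have : ((i.toNat : Int) + 1) ∈ l := (hQ i.toNat hlt).mp (by rw [← hi]; exact hcon)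
      rw [hlnil] at this
      simp at this
    rw [hfil]
    rfl
  | some M =>
    have hMl : M ∈ l := PySem.List.max?_mem hmx
    have hMm0 : M ∈ m0 := ((hmeml M).mp hMl).1
    have hMb : 1 ≤ M ∧ M ≤ 52 := by
      rw [hm0] at hMm0
      obtain ⟨c, hc, hceq⟩ := List.mem_map.mp hMm0
      rw [← hceq]
      exact prio_bounds c (hl0 c hc)
    have hMQ : (M - 1) ∈ ((PySem.List.pyRange 0 52 1).filter
        (fun i => decide (0 < PySem.List.pyGetD t0 i 0 ∧ 0 < PySem.List.pyGetD t1 i 0 ∧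
                          0 < PySem.List.pyGetD t2 i 0))) := by
      rw [List.mem_filter]
      constructor
      · exact PySem.List.mem_pyRange_one.mpr (by omega)
      · simp only [decide_eq_true_eq]
        have h1 : M - 1 = (((M-1).toNat : Nat) : Int) := by omega
        have h2 : (M-1).toNat < 52 := by omega
        rw [h1]
        exact (hQ (M-1).toNat h2).mpr (by rw [← h1, sub_add_cancel]; exact hMl)
    obtain ⟨j, hj⟩ : ∃ j, ((PySem.List.pyRange 0 52 1).filter
        (fun i => decide (0 < PySem.List.pyGetD t0 i 0 ∧ 0 < PySem.List.pyGetD t1 i 0 ∧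
                          0 < PySem.List.pyGetD t2 i 0))).getLast? = some j := by
      cases hgl : (List.filter _ _).getLast? with
      | none => rw [List.getLast?_eq_none_iff] at hgl; rw [hgl] at hMQ; simp at hMQ
      | some j => exact ⟨j, rfl⟩
    have hjmem := List.mem_of_getLast? hj
    have hjQ := (List.mem_filter.mp hjmem).2
    have hjR := PySem.List.mem_pyRange_one.mp (List.mem_filter.mp hjmem).1
    have hjN : j = ((j.toNat : Nat) : Int) := by omega
    have hjlt : j.toNat < 52 := by omega
    have hjl : (j + 1) ∈ l := by
      rw [hjN]
      exact (hQ j.toNat hjlt).mp (by rw [← hjN]; simpa using hjQ)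
    have hjle : j + 1 ≤ M := PySem.List.max?_isMax hmx _ hjl
    have hMle : M - 1 ≤ j := pairwise_le_getLast hpair hMQ hj
    have hjM : j = M - 1 := by omega
    rw [hj]
    simp only [Option.map_some, Option.getD_some, hjM]
    omega

-- ===== VERDICT (by name: the statement is the Claim_ definition above) =====
theorem check_for_badge_spec : Claim_equal_check_for_badge := by
  intro set _ hpre
  unfold Spec_check_for_badge
  exact check_for_badge_main set ⟨hpre.1, by simpa [List.all_eq_true] using hpre.2⟩
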